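-- pv_equiv track=rewrite | github.com/KKenK/AoC_2024_day_3 | part_2.py | get_enabled_code
-- ===== SOURCE A (Python) =====
-- import operator
--
-- def get_enabled_code(input):
--
--     input = "do()" + input
--
--     do_indexs = [(x, "do()")for x in find_instruction_indexs(input, "do()")]
--
--     dont_indexs = [(x, "don't()")for x in find_instruction_indexs(input, "don't()")]
--
--     sorted_instruction_indexs = sorted(do_indexs + dont_indexs, key= operator.itemgetter(0))
--
--     sorted_instruction_indexs = remove_consecutive_duplicate_commands(sorted_instruction_indexs)
--
--     enabled_input = slice_together_enabled_code_using_instruction_indexs(input, sorted_instruction_indexs)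
--
--     return enabled_input
--
-- def find_instruction_indexs(input, instuction_string):
--
--     instuction_string_length = len(instuction_string)
--
--     instruction_indexs = []
--
--     for i in range(0, len(input) - instuction_string_length):
--
--         if not input[i : i + instuction_string_length] == instuction_string:
--             continue
--
--         instruction_indexs.append(i)
--
--     return instruction_indexs
--
-- def remove_consecutive_duplicate_commands(sorted_instruction_indexs):
--
--     i = 0
--
--     last_instruction_index = len(sorted_instruction_indexs) - 1
--
--     while i < last_instruction_index:
--
--         if not sorted_instruction_indexs[i][1] == sorted_instruction_indexs[i + 1][1]:
--             i += 1
--             continue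
--
--         sorted_instruction_indexs.pop(i + 1)
--
--         last_instruction_index -= 1
--
--     return sorted_instruction_indexs
--
-- def slice_together_enabled_code_using_instruction_indexs(input, sorted_instruction_indexs):
--
--     enabled_input = ""
--
--     for i in range(0, len(sorted_instruction_indexs) - 1, 2):
--
--         enabled_input += input[sorted_instruction_indexs[i][0]: sorted_instruction_indexs[i + 1][0]]
--
--     if sorted_instruction_indexs[-1][1] == "do()":
--         enabled_input += input[sorted_instruction_indexs[-1][0]: ]
--
--     return enabled_input
-- ===== SOURCE B (Python) =====
-- def get_enabled_code(input):
--     s = "do()" + input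
--     events = []
--     for i in range(len(s)):
--         if s.startswith("do()", i):
--             events.append((i, "do()"))
--         elif s.startswith("don't()", i):
--             events.append((i, "don't()"))
--     kept = []
--     for e in events:
--         if not kept or kept[-1][1] != e[1]:
--             kept.append(e)
--     parts = []
--     for j in range(0, len(kept) - 1, 2):
--         parts.append(s[kept[j][0]:kept[j + 1][0]])
--     if kept[-1][1] == "do()":
--         parts.append(s[kept[-1][0]:])
--     return "".join(parts)
-- ===== Notes on version B (the rewrite author's own statement) =====
-- stated objective: simpler
-- what changed: One merged linear scan with str.startswith builds the do/don't event list already in index order (replacing A's two separate whole-string index scans plus a sort), consecutive same-type events are dropped by building a new list instead of A's quadratic while-loop with mid-list pop, and the enabled slices are collected in a list and joined once instead of repeated string concatenation.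
-- intended difference: On inputs whose text ends exactly with a do() marker while disabled or with a don't() marker while enabled, A silently ignores that final marker (its scan range stops one position before the end of the string) and so returns the tail of the text in the wrong on/off state, while B honours the final marker, which is the intended enable/disable semantics. — e.g. on get_enabled_code("xdon't()"): A returns "do()xdon't()", B returns "do()x"
import Mathlib
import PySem

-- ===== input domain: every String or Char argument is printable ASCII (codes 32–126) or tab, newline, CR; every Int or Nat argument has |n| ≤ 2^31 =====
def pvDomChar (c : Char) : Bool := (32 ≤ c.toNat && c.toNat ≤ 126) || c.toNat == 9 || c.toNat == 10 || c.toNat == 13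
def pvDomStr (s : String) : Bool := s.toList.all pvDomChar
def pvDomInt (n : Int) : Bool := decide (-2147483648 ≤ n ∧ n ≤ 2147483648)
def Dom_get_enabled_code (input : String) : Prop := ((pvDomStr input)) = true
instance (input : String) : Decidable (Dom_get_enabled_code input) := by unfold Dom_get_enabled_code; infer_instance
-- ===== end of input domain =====

-- B replaces A's two index scans + sort + quadratic while/pop dedup by one ordered merged scan and a
-- rebuilt (instead of mutated) run-collapsed list; equivalence is proved outside D_ (A's scan range
-- misses a marker sitting exactly at the end of the text).

def doP : List Char := ['d', 'o', '(', ')']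
def dontP : List Char := ['d', 'o', 'n', '\'', 't', '(', ')']

-- ===== PORT A =====
-- find_instruction_indexs: for i in range(0, len(input) - m): if input[i:i+m] == t: append i
-- (slice input[i:i+m] with 0 ≤ i is (s.drop i).take m — exact here)
def pvFind (s t : List Char) : List Nat :=
  (List.range (s.length - t.length)).filter (fun i => (s.drop i).take t.length == t)

-- remove_consecutive_duplicate_commands: while i < len-1: pop i+1 on equal tags else i += 1
def pvDedupAF : Nat → List (Nat × List Char) → Nat → List (Nat × List Char)
  | 0, l, _ => l
  | f + 1, l, i =>
    if i + 1 < l.length then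
      if (l.getD i (0, [])).2 == (l.getD (i + 1) (0, [])).2 then
        pvDedupAF f (l.eraseIdx (i + 1)) i
      else
        pvDedupAF f l (i + 1)
    else l
-- fuel 2*len bounds the loop's step count (each step lowers 2*len - i), so this IS the while loop
def pvDedupA (l : List (Nat × List Char)) (i : Nat) : List (Nat × List Char) :=
  pvDedupAF (2 * l.length) l i

-- slice_together..., the loop part: for i in range(0, len(l)-1, 2): acc += s[l[i][0]:l[i+1][0]]
def pvSliceAF (s : List Char) (l : List (Nat × List Char)) : Nat → Nat → List Char
  | 0, _ => []
  | f + 1, i =>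
    if i + 1 < l.length then
      ((s.drop (l.getD i (0, [])).1).take ((l.getD (i + 1) (0, [])).1 - (l.getD i (0, [])).1))
        ++ pvSliceAF s l f (i + 2)
    else []
-- fuel len bounds the loop's step count (i advances by 2 while i+1 < len)
def pvSliceA (s : List Char) (l : List (Nat × List Char)) (i : Nat) : List Char :=
  pvSliceAF s l l.length i

def get_enabled_code (input : String) : String :=
  let s := doP ++ input.toList
  let doIdx := (pvFind s doP).map (fun x => (x, doP))
  let dontIdx := (pvFind s dontP).map (fun x => (x, dontP))
  let sortedIdx := PySem.List.sorted (doIdx ++ dontIdx) (fun p => p.1) false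
  let kept := pvDedupA sortedIdx 0
  -- kept[-1] raises IndexError on kept = [] (only for the empty input); that input is outside Pre_
  let tail := match kept.getLast? with
    | some last => if last.2 == doP then s.drop last.1 else []
    | none => []
  String.ofList (pvSliceA s kept 0 ++ tail)

-- ===== PORT B =====
-- one merged scan: for i in range(len(s)): startswith do() / don't() at i → append event
def pvScanB (s : List Char) : List (Nat × List Char) :=
  (List.range s.length).filterMap (fun i =>
    if doP.isPrefixOf (s.drop i) then some (i, doP)
    else if dontP.isPrefixOf (s.drop i) then some (i, dontP)
    else none)

-- kept: append e unless the last kept event has the same tag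
def pvKeepB (events : List (Nat × List Char)) : List (Nat × List Char) :=
  events.foldl (fun kept e =>
    match kept.getLast? with
    | none => kept ++ [e]
    | some last => if last.2 == e.2 then kept else kept ++ [e]) []

-- parts: for j in range(0, len(kept)-1, 2): append s[kept[j][0]:kept[j+1][0]]
def pvSliceBF (s : List Char) (l : List (Nat × List Char)) : Nat → Nat → List (List Char)
  | 0, _ => []
  | f + 1, j =>
    if j + 1 < l.length then
      ((s.drop (l.getD j (0, [])).1).take ((l.getD (j + 1) (0, [])).1 - (l.getD j (0, [])).1))
        :: pvSliceBF s l f (j + 2)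
    else []
def pvSliceB (s : List Char) (l : List (Nat × List Char)) (j : Nat) : List (List Char) :=
  pvSliceBF s l l.length j

def get_enabled_code_alt (input : String) : String :=
  let s := doP ++ input.toList
  let kept := pvKeepB (pvScanB s)
  let parts := pvSliceB s kept 0 ++
    (match kept.getLast? with
     | some last => if last.2 == doP then [s.drop last.1] else []
     | none => [])
  String.ofList parts.flatten

-- ===== PRECONDITION & SPEC =====
-- Pre_ excludes only the empty input string, on which A's kept[-1] indexing raises IndexError.
def Pre_get_enabled_code (input : String) : Prop := input ≠ ""
instance (input : String) : Decidable (Pre_get_enabled_code input) := by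
  unfold Pre_get_enabled_code; infer_instance
def pvWitness_get_enabled_code : String := "x"

-- helpers for D_ (independent of both ports): a marker "counts" for A only when it is followed by
-- at least one further character; pvLastDo computes the tag of the last counting marker.
def pvStrictDo (l : List Char) : Bool := doP.isPrefixOf l && decide (4 < l.length)
def pvStrictDont (l : List Char) : Bool := dontP.isPrefixOf l && decide (7 < l.length)
def pvLastDo : List Char → Bool → Bool
  | [], acc => acc
  | c :: rest, acc =>
    pvLastDo rest (if pvStrictDo (c :: rest) then true
                   else if pvStrictDont (c :: rest) then false else acc)

-- On inputs whose text ends exactly with a do() marker while disabled or a don't() marker while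
-- enabled, A's range(0, len - len(marker)) scan ignores that final marker and returns the text with
-- the wrong final on/off state, while B honours the final marker, which is the intended semantics.
def D_get_enabled_code (input : String) : Prop :=
  input ≠ "" ∧
    ((doP.isSuffixOf (doP ++ input.toList) ∧ pvLastDo (doP ++ input.toList) true = false) ∨
     (dontP.isSuffixOf (doP ++ input.toList) ∧ pvLastDo (doP ++ input.toList) true = true))
instance (input : String) : Decidable (D_get_enabled_code input) := by
  unfold D_get_enabled_code; infer_instance

def Spec_get_enabled_code (input : String) (out : String) : Prop :=
  ¬ D_get_enabled_code input → out = get_enabled_code_alt input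
instance (input : String) (out : String) : Decidable (Spec_get_enabled_code input out) := by
  unfold Spec_get_enabled_code; infer_instance

def pvDiffWitness_get_enabled_code : String := "xdon't()"
def pvDiffWitnessOut_get_enabled_code : String × String := ("do()xdon't()", "do()x")

-- ===== CLAIM (what is proved, stated in full; the proofs are below) =====
def Claim_unchanged_get_enabled_code : Prop := ∀ (input : String), Dom_get_enabled_code input → Pre_get_enabled_code input → Spec_get_enabled_code input (get_enabled_code input)
def Claim_changed_get_enabled_code : Prop := Dom_get_enabled_code (pvDiffWitness_get_enabled_code) ∧ Pre_get_enabled_code (pvDiffWitness_get_enabled_code) ∧ D_get_enabled_code (pvDiffWitness_get_enabled_code) ∧ get_enabled_code (pvDiffWitness_get_enabled_code) = pvDiffWitnessOut_get_enabled_code.1 ∧ get_enabled_code_alt (pvDiffWitness_get_enabled_code) = pvDiffWitnessOut_get_enabled_code.2 ∧ pvDiffWitnessOut_get_enabled_code.1 ≠ pvDiffWitnessOut_get_enabled_code.2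
def Claim_exact_get_enabled_code : Prop := ∀ (input : String), Dom_get_enabled_code input → Pre_get_enabled_code input → D_get_enabled_code input → get_enabled_code input ≠ get_enabled_code_alt input

-- ===== LEMMAS AND PROOFS =====

-- strict / full per-position event functions (proof layer)
def gA (l : List Char) (i : Nat) : Option (Nat × List Char) :=
  if pvStrictDo l then some (i, doP) else if pvStrictDont l then some (i, dontP) else none
def gB (l : List Char) (i : Nat) : Option (Nat × List Char) :=
  if doP.isPrefixOf l then some (i, doP)
  else if dontP.isPrefixOf l then some (i, dontP) else none
def evA (s : List Char) : List (Nat × List Char) :=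
  (List.range s.length).filterMap (fun i => gA (s.drop i) i)

-- canonical first-of-run collapse
def drun (τ : List Char) : List (Nat × List Char) → List (Nat × List Char)
  | [] => []
  | e :: t => if e.2 == τ then drun τ t else e :: drun e.2 t

lemma scanB_eq (s : List Char) :
    pvScanB s = (List.range s.length).filterMap (fun i => gB (s.drop i) i) := rfl

-- generic: (l.filter p).map (·, v) as a filterMap
lemma filter_map_eq_filterMap (p : Nat → Bool) (v : List Char) (l : List Nat) :
    (l.filter p).map (fun x => (x, v)) = l.filterMap (fun i => if p i then some (i, v) else none) := by
  induction l with
  | nil => rfl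
  | cons a t ih => by_cases h : p a <;> simp [h, ih]

lemma take_beq_eq_isPrefixOf (t l : List Char) : (l.take t.length == t) = t.isPrefixOf l := by
  rcases Bool.eq_false_or_eq_true (t.isPrefixOf l) with h | h <;> rw [h]
  · exact beq_iff_eq.mpr (List.prefix_iff_eq_take.mp (List.isPrefixOf_iff_prefix.mp h)).symm
  · rw [beq_eq_false_iff_ne]
    intro he
    have hpre : t <+: l := List.prefix_iff_eq_take.mpr he.symm
    rw [List.isPrefixOf_iff_prefix.mpr hpre] at h
    cases h

lemma filterMap_range_drop (f : Nat → Option (Nat × List Char)) (n k : Nat) (hk : k ≤ n)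
    (h : ∀ i, k ≤ i → f i = none) :
    (List.range n).filterMap f = (List.range k).filterMap f := by
  have hn : n = k + (n - k) := by omega
  rw [hn, List.range_add, List.filterMap_append, List.filterMap_map]
  have hnil : (List.range (n - k)).filterMap (f ∘ (k + ·)) = [] := by
    rw [List.filterMap_eq_nil_iff]
    intro a _
    exact h _ (Nat.le_add_right _ _)
  rw [hnil, List.append_nil]

lemma filterMap_two_perm (p q : Nat → Bool) (u v : List Char)
    (hpq : ∀ i, ¬(p i = true ∧ q i = true)) : ∀ (l : List Nat),
    (l.filterMap (fun i => if p i then some (i, u) else if q i then some (i, v) else none)).Perm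
      (l.filterMap (fun i => if p i then some (i, u) else none) ++
       l.filterMap (fun i => if q i then some (i, v) else none))
  | [] => by simp
  | a :: t => by
    have ih := filterMap_two_perm p q u v hpq t
    by_cases hp : p a
    · have hq : q a = false := by
        cases hqa : q a
        · rfl
        · exact absurd ⟨hp, hqa⟩ (hpq a)
      simp only [List.filterMap_cons, hp, hq, if_true, List.cons_append]
      exact ih.cons _
    · by_cases hq : q a
      · simp only [List.filterMap_cons, hp, hq, if_true]
        exact (ih.cons _).trans List.perm_middle.symm
      · simp only [List.filterMap_cons, hp, hq]
        exact ih

lemma gA_fst {l : List Char} {i : Nat} {e : Nat × List Char} (h : gA l i = some e) : e.1 = i := by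
  unfold gA at h
  split_ifs at h
  · injection h with h; rw [← h]
  · injection h with h; rw [← h]

lemma evA_pairwise (s : List Char) : (evA s).Pairwise (fun a b => a.1 < b.1) := by
  unfold evA
  rw [List.pairwise_filterMap]
  refine List.Pairwise.imp ?_ List.pairwise_lt_range
  intro a b hab x hx y hy
  rw [gA_fst hx, gA_fst hy]
  exact hab

lemma doIdx_eq (s : List Char) :
    (pvFind s doP).map (fun x => (x, doP)) =
      (List.range s.length).filterMap
        (fun i => if pvStrictDo (s.drop i) then some (i, doP) else none) := by
  unfold pvFind
  rw [filter_map_eq_filterMap,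
    filterMap_range_drop _ s.length (s.length - doP.length) (by omega) ?_]
  · apply List.filterMap_congr
    intro i hi
    have hi' : i < s.length - doP.length := List.mem_range.mp hi
    have hlen : (s.drop i).length = s.length - i := List.length_drop
    have h4 : doP.length = 4 := rfl
    have hgt : decide (4 < (s.drop i).length) = true := by
      rw [decide_eq_true_iff]; omega
    unfold pvStrictDo
    rw [take_beq_eq_isPrefixOf, hgt, Bool.and_true]
  · intro i hile
    have hlen : (s.drop i).length = s.length - i := List.length_drop
    have h4 : doP.length = 4 := rfl
    unfold pvStrictDo
    have hgt : decide (4 < (s.drop i).length) = false := by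
      rw [decide_eq_false_iff_not]; omega
    rw [hgt, Bool.and_false]
    simp

lemma dontIdx_eq (s : List Char) :
    (pvFind s dontP).map (fun x => (x, dontP)) =
      (List.range s.length).filterMap
        (fun i => if pvStrictDont (s.drop i) then some (i, dontP) else none) := by
  unfold pvFind
  rw [filter_map_eq_filterMap,
    filterMap_range_drop _ s.length (s.length - dontP.length) (by omega) ?_]
  · apply List.filterMap_congr
    intro i hi
    have hi' : i < s.length - dontP.length := List.mem_range.mp hi
    have hlen : (s.drop i).length = s.length - i := List.length_drop
    have h7 : dontP.length = 7 := rfl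
    have hgt : decide (7 < (s.drop i).length) = true := by
      rw [decide_eq_true_iff]; omega
    unfold pvStrictDont
    rw [take_beq_eq_isPrefixOf, hgt, Bool.and_true]
  · intro i hile
    have hlen : (s.drop i).length = s.length - i := List.length_drop
    have h7 : dontP.length = 7 := rfl
    unfold pvStrictDont
    have hgt : decide (7 < (s.drop i).length) = false := by
      rw [decide_eq_false_iff_not]; omega
    rw [hgt, Bool.and_false]
    simp

lemma strict_not_both (l : List Char) : ¬(pvStrictDo l = true ∧ pvStrictDont l = true) := by
  rintro ⟨h1, h2⟩
  unfold pvStrictDo at h1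
  unfold pvStrictDont at h2
  have hdo : doP <+: l := List.isPrefixOf_iff_prefix.mp (Bool.and_elim_left h1)
  have hdont : dontP <+: l := List.isPrefixOf_iff_prefix.mp (Bool.and_elim_left h2)
  obtain ⟨u, hu⟩ := hdo
  obtain ⟨w, hw⟩ := hdont
  rw [← hu] at hw
  have h3 := congrArg (fun l : List Char => l[2]?) hw
  simp [doP, dontP] at h3

lemma sortedIdx_eq (s : List Char) :
    PySem.List.sorted ((pvFind s doP).map (fun x => (x, doP)) ++
        (pvFind s dontP).map (fun x => (x, dontP))) (fun p => p.1) false = evA s := by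
  apply PySem.List.sorted_eq_of_perm_of_pairwise_lt
  · rw [doIdx_eq, dontIdx_eq]
    exact filterMap_two_perm _ _ _ _ (fun i => strict_not_both (s.drop i)) _
  · exact evA_pairwise s

lemma drun_cons_eq (τ : List Char) (e : Nat × List Char) (t : List (Nat × List Char))
    (h : e.2 = τ) : drun τ (e :: t) = drun τ t := by
  simp [drun, h]

lemma drun_cons_ne (τ : List Char) (e : Nat × List Char) (t : List (Nat × List Char))
    (h : e.2 ≠ τ) : drun τ (e :: t) = e :: drun e.2 t := by
  simp [drun, h]

lemma dedupAF_go : ∀ (rest : List (Nat × List Char)) (f : Nat) (pre : List (Nat × List Char))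
    (a : Nat × List Char), 2 * rest.length + 1 ≤ f →
    pvDedupAF f (pre ++ a :: rest) pre.length = pre ++ a :: drun a.2 rest := by
  intro rest
  induction rest with
  | nil =>
    intro f pre a hf
    match f, hf with
    | f + 1, _ =>
      unfold pvDedupAF
      rw [if_neg (by simp)]
      show pre ++ [a] = pre ++ a :: drun a.2 []
      rfl
  | cons b t ih =>
    intro f pre a hf
    match f, hf with
    | f + 1, hf =>
      unfold pvDedupAF
      rw [if_pos (by simp)]
      have hget1 : (pre ++ a :: b :: t).getD pre.length (0, []) = a := by
        rw [List.getD_eq_getElem?_getD, List.getElem?_append_right (Nat.le_refl _)]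
        simp
      have hget2 : (pre ++ a :: b :: t).getD (pre.length + 1) (0, []) = b := by
        rw [List.getD_eq_getElem?_getD, List.getElem?_append_right (by omega)]
        simp
      rw [hget1, hget2]
      by_cases htag : a.2 = b.2
      · rw [if_pos (beq_iff_eq.mpr htag)]
        have herase : (pre ++ a :: b :: t).eraseIdx (pre.length + 1) = pre ++ a :: t := by
          have hsp : pre ++ a :: b :: t = (pre ++ [a]) ++ b :: t := by simp
          rw [hsp, List.eraseIdx_append_of_length_le (by simp)]
          simp
        rw [herase, ih f pre a (by simp at hf ⊢; omega),
          drun_cons_eq a.2 b t htag.symm]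
      · rw [if_neg (by simp [htag])]
        have hsplit : pre ++ a :: b :: t = (pre ++ [a]) ++ b :: t := by simp
        have hlen : (pre ++ [a]).length = pre.length + 1 := by simp
        rw [hsplit, ← hlen, ih f (pre ++ [a]) b (by simp at hf ⊢; omega),
          drun_cons_ne a.2 b t (fun hx => htag hx.symm)]
        simp

lemma dedupA_eq (l : List (Nat × List Char)) :
    pvDedupA l 0 = match l with | [] => [] | e :: t => e :: drun e.2 t := by
  match l with
  | [] => rfl
  | e :: t =>
    show pvDedupAF (2 * (e :: t).length) ([] ++ e :: t) ([] : List (Nat × List Char)).length = _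
    rw [dedupAF_go t (2 * (e :: t).length) [] e (by simp)]
    simp

lemma keepB_go : ∀ (t pre : List (Nat × List Char)) (last : Nat × List Char),
    pre.getLast? = some last →
    t.foldl (fun kept e =>
      match kept.getLast? with
      | none => kept ++ [e]
      | some last => if last.2 == e.2 then kept else kept ++ [e]) pre = pre ++ drun last.2 t := by
  intro t
  induction t with
  | nil => intro pre last h; simp [drun]
  | cons e t' ih =>
    intro pre last h
    rw [List.foldl_cons]
    by_cases htag : last.2 = e.2
    · have hstep : (match pre.getLast? with
        | none => pre ++ [e]
        | some last => if last.2 == e.2 then pre else pre ++ [e]) = pre := by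
        rw [h]
        simp [beq_iff_eq.mpr htag]
      rw [hstep, ih pre last h, drun_cons_eq last.2 e t' htag.symm]
    · have hstep : (match pre.getLast? with
        | none => pre ++ [e]
        | some last => if last.2 == e.2 then pre else pre ++ [e]) = pre ++ [e] := by
        rw [h]
        simp [htag]
      rw [hstep, ih (pre ++ [e]) e List.getLast?_concat,
        drun_cons_ne last.2 e t' (fun hx => htag hx.symm)]
      simp

lemma keepB_eq (l : List (Nat × List Char)) :
    pvKeepB l = match l with | [] => [] | e :: t => e :: drun e.2 t := by
  match l with
  | [] => rfl
  | e :: t =>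
    unfold pvKeepB
    rw [List.foldl_cons]
    have h0 : (match ([] : List (Nat × List Char)).getLast? with
      | none => ([] : List (Nat × List Char)) ++ [e]
      | some last => if last.2 == e.2 then [] else [] ++ [e]) = [e] := rfl
    rw [h0, keepB_go t [e] e rfl]
    rfl

lemma sliceF_eq (s : List Char) (l : List (Nat × List Char)) :
    ∀ (f i : Nat), pvSliceAF s l f i = (pvSliceBF s l f i).flatten := by
  intro f
  induction f with
  | zero => intro i; rfl
  | succ f ih =>
    intro i
    unfold pvSliceAF pvSliceBF
    split
    · rw [List.flatten_cons, ih]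
    · rfl

lemma drun_absorb : ∀ (t : List (Nat × List Char)) (τ : List Char) (e : Nat × List Char),
    e.2 = ((t.getLast?.map (fun x => x.2)).getD τ) → drun τ (t ++ [e]) = drun τ t := by
  intro t
  induction t with
  | nil =>
    intro τ e h
    simp at h
    simp [drun, beq_iff_eq.mpr h]
  | cons x t' ih =>
    intro τ e h
    cases t' with
    | nil =>
      simp at h
      by_cases hx : x.2 = τ
      · rw [show (x :: []) ++ [e] = x :: [e] from rfl, drun_cons_eq τ x [e] hx,
          drun_cons_eq τ x [] hx, drun_cons_eq τ e [] (h.trans hx)]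
      · rw [show (x :: []) ++ [e] = x :: [e] from rfl, drun_cons_ne τ x [e] hx,
          drun_cons_ne τ x [] hx, drun_cons_eq x.2 e [] h]
    | cons y t'' =>
      rw [List.getLast?_cons_cons] at h
      rw [show (x :: y :: t'') ++ [e] = x :: ((y :: t'') ++ [e]) from rfl]
      by_cases hx : x.2 = τ
      · rw [drun_cons_eq τ x _ hx, drun_cons_eq τ x _ hx, ih τ e h]
      · rw [drun_cons_ne τ x _ hx, drun_cons_ne τ x _ hx, ih x.2 e h]

-- tags of the strict scan, and their relation to evA and pvLastDo
def pvTags : List Char → List Bool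
  | [] => []
  | c :: rest =>
    (if pvStrictDo (c :: rest) then [true]
     else if pvStrictDont (c :: rest) then [false] else []) ++ pvTags rest

lemma lastDo_eq_tags : ∀ (cs : List Char) (acc : Bool),
    pvLastDo cs acc = (pvTags cs).getLastD acc := by
  intro cs
  induction cs with
  | nil => intro acc; rfl
  | cons c rest ih =>
    intro acc
    show pvLastDo rest _ = _
    rw [show pvTags (c :: rest) =
      (if pvStrictDo (c :: rest) then [true]
       else if pvStrictDont (c :: rest) then [false] else []) ++ pvTags rest from rfl]
    split_ifs with h1 h2
    · rw [show ([true] ++ pvTags rest : List Bool) = true :: pvTags rest from rfl,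
        List.getLastD_cons]
      exact ih true
    · rw [show ([false] ++ pvTags rest : List Bool) = false :: pvTags rest from rfl,
        List.getLastD_cons]
      exact ih false
    · rw [List.nil_append]
      exact ih acc

lemma tags_eq_filterMap : ∀ (cs : List Char), pvTags cs =
    (List.range cs.length).filterMap
      (fun i => if pvStrictDo (cs.drop i) then some true
                else if pvStrictDont (cs.drop i) then some false else none) := by
  intro cs
  induction cs with
  | nil => rfl
  | cons c rest ih =>
    rw [show (c :: rest).length = rest.length + 1 from rfl, List.range_succ_eq_map,
      List.filterMap_cons, List.filterMap_map]
    have hcomp : ((fun i => if pvStrictDo ((c :: rest).drop i) = true then some true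
          else if pvStrictDont ((c :: rest).drop i) = true then some false else none) ∘ Nat.succ)
        = (fun i => if pvStrictDo (rest.drop i) = true then some true
          else if pvStrictDont (rest.drop i) = true then some false else none) := by
      funext i; rfl
    rw [hcomp, ← ih]
    show pvTags (c :: rest) = _
    rw [show pvTags (c :: rest) =
      (if pvStrictDo (c :: rest) then [true]
       else if pvStrictDont (c :: rest) then [false] else []) ++ pvTags rest from rfl]
    simp only [List.drop_zero]
    split_ifs <;> rfl

lemma tags_eq_map (s : List Char) :
    pvTags s = (evA s).map (fun e => e.2 == doP) := by
  rw [tags_eq_filterMap]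
  unfold evA
  rw [List.map_filterMap]
  apply List.filterMap_congr
  intro i _
  unfold gA
  split_ifs <;> simp [doP, dontP]

lemma evA_snd {s : List Char} {e : Nat × List Char} (h : e ∈ evA s) :
    e.2 = doP ∨ e.2 = dontP := by
  unfold evA at h
  obtain ⟨i, _, hg⟩ := List.mem_filterMap.mp h
  unfold gA at hg
  split_ifs at hg
  · injection hg with hg; rw [← hg]; left; rfl
  · injection hg with hg; rw [← hg]; right; rfl

lemma suffix_drop {t s : List Char} (h : t.isSuffixOf s = true) :
    s.drop (s.length - t.length) = t :=
  (List.suffix_iff_eq_drop.mp (List.isSuffixOf_iff_suffix.mp h)).symm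

lemma not_both_suffix {s : List Char} (hdo : doP.isSuffixOf s = true)
    (hdont : dontP.isSuffixOf s = true) : False := by
  rcases List.suffix_or_suffix_of_suffix (List.isSuffixOf_iff_suffix.mp hdo)
      (List.isSuffixOf_iff_suffix.mp hdont) with h | h
  · exact absurd (List.isSuffixOf_iff_suffix.mpr h) (by decide)
  · exact absurd (List.isSuffixOf_iff_suffix.mpr h) (by decide)

lemma gBA (l : List Char) (i : Nat) (h4 : l ≠ doP) (h7 : l ≠ dontP) : gB l i = gA l i := by
  unfold gB gA pvStrictDo pvStrictDont
  by_cases hdo : doP.isPrefixOf l = true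
  · have hpre := List.isPrefixOf_iff_prefix.mp hdo
    have hlen : 4 ≤ l.length := hpre.length_le
    have hne : l.length ≠ 4 := fun he =>
      h4 (hpre.eq_of_length (by rw [he]; rfl)).symm
    have hgt : decide (4 < l.length) = true := by rw [decide_eq_true_iff]; omega
    simp [hdo, hgt]
  · by_cases hdont : dontP.isPrefixOf l = true
    · have hpre := List.isPrefixOf_iff_prefix.mp hdont
      have hlen : 7 ≤ l.length := hpre.length_le
      have hne : l.length ≠ 7 := fun he =>
        h7 (hpre.eq_of_length (by rw [he]; rfl)).symm
      have hgt : decide (7 < l.length) = true := by rw [decide_eq_true_iff]; omega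
      simp [hdo, hdont, hgt]
    · simp [hdo, hdont]

lemma drop_ne_doP {s : List Char} {i : Nat} (h : s.length - i ≠ 4) : s.drop i ≠ doP :=
  fun he => h (by rw [← List.length_drop, he]; rfl)

lemma drop_ne_dontP {s : List Char} {i : Nat} (h : s.length - i ≠ 7) : s.drop i ≠ dontP :=
  fun he => h (by rw [← List.length_drop, he]; rfl)

lemma E_none (s : List Char) (hdo : doP.isSuffixOf s = false)
    (hdont : dontP.isSuffixOf s = false) : pvScanB s = evA s := by
  rw [scanB_eq]
  unfold evA
  apply List.filterMap_congr
  intro i _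
  apply gBA
  · intro he
    rw [List.isSuffixOf_iff_suffix.mpr (he ▸ List.drop_suffix i s)] at hdo
    cases hdo
  · intro he
    rw [List.isSuffixOf_iff_suffix.mpr (he ▸ List.drop_suffix i s)] at hdont
    cases hdont

lemma gB_doP (i : Nat) : gB doP i = some (i, doP) := by
  unfold gB; rw [if_pos (by decide)]
lemma gA_doP (i : Nat) : gA doP i = none := by
  unfold gA; rw [if_neg (by decide), if_neg (by decide)]
lemma gB_doP_drop : ∀ j, 1 ≤ j → j ≤ 3 → ∀ i, gB (doP.drop j) i = none := by
  intro j h1 h3 i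
  unfold gB
  interval_cases j <;> rw [if_neg (by decide), if_neg (by decide)]
lemma gA_doP_drop : ∀ j, j ≤ 3 → ∀ i, gA (doP.drop j) i = none := by
  intro j h3 i
  unfold gA
  interval_cases j <;> rw [if_neg (by decide), if_neg (by decide)]
lemma gB_dontP (i : Nat) : gB dontP i = some (i, dontP) := by
  unfold gB; rw [if_neg (by decide), if_pos (by decide)]
lemma gA_dontP (i : Nat) : gA dontP i = none := by
  unfold gA; rw [if_neg (by decide), if_neg (by decide)]
lemma gB_dontP_drop : ∀ j, 1 ≤ j → j ≤ 6 → ∀ i, gB (dontP.drop j) i = none := by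
  intro j h1 h6 i
  unfold gB
  interval_cases j <;> rw [if_neg (by decide), if_neg (by decide)]
lemma gA_dontP_drop : ∀ j, j ≤ 6 → ∀ i, gA (dontP.drop j) i = none := by
  intro j h6 i
  unfold gA
  interval_cases j <;> rw [if_neg (by decide), if_neg (by decide)]

lemma E_do (s : List Char) (hdo : doP.isSuffixOf s = true) :
    pvScanB s = evA s ++ [(s.length - 4, doP)] := by
  have hdrop : s.drop (s.length - 4) = doP := suffix_drop hdo
  have hlen : 4 ≤ s.length :=
    (List.isSuffixOf_iff_suffix.mp hdo).length_le
  have hd : ∀ j, s.drop (s.length - 4 + j) = doP.drop j := by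
    intro j; rw [← List.drop_drop, hdrop]
  have hrange : List.range s.length =
      List.range (s.length - 4) ++ (List.range 4).map ((s.length - 4) + ·) := by
    rw [← List.range_add]; congr 1; omega
  rw [scanB_eq]
  unfold evA
  rw [hrange, List.filterMap_append, List.filterMap_append]
  have hpre : (List.range (s.length - 4)).filterMap (fun i => gB (s.drop i) i) =
      (List.range (s.length - 4)).filterMap (fun i => gA (s.drop i) i) := by
    apply List.filterMap_congr
    intro i hi
    have hi' : i < s.length - 4 := List.mem_range.mp hi
    apply gBA
    · exact drop_ne_doP (by omega)
    · intro he
      exact not_both_suffix hdo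
        (List.isSuffixOf_iff_suffix.mpr (he ▸ List.drop_suffix i s))
  have hexp : (List.range 4).map ((s.length - 4) + ·) =
      [s.length - 4 + 0, s.length - 4 + 1, s.length - 4 + 2, s.length - 4 + 3] := rfl
  rw [hpre, hexp]
  simp only [List.filterMap_cons, List.filterMap_nil, hd 0, hd 1, hd 2, hd 3, List.drop_zero,
    gB_doP, gB_doP_drop 1 (by omega) (by omega), gB_doP_drop 2 (by omega) (by omega),
    gB_doP_drop 3 (by omega) (by omega), gA_doP, gA_doP_drop 1 (by omega),
    gA_doP_drop 2 (by omega), gA_doP_drop 3 (by omega)]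
  simp

lemma E_dont (s : List Char) (hdont : dontP.isSuffixOf s = true) :
    pvScanB s = evA s ++ [(s.length - 7, dontP)] := by
  have hdrop : s.drop (s.length - 7) = dontP := suffix_drop hdont
  have hlen : 7 ≤ s.length :=
    (List.isSuffixOf_iff_suffix.mp hdont).length_le
  have hd : ∀ j, s.drop (s.length - 7 + j) = dontP.drop j := by
    intro j; rw [← List.drop_drop, hdrop]
  have hrange : List.range s.length =
      List.range (s.length - 7) ++ (List.range 7).map ((s.length - 7) + ·) := by
    rw [← List.range_add]; congr 1; omega
  rw [scanB_eq]
  unfold evA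
  rw [hrange, List.filterMap_append, List.filterMap_append]
  have hpre : (List.range (s.length - 7)).filterMap (fun i => gB (s.drop i) i) =
      (List.range (s.length - 7)).filterMap (fun i => gA (s.drop i) i) := by
    apply List.filterMap_congr
    intro i hi
    have hi' : i < s.length - 7 := List.mem_range.mp hi
    exact gBA _ _ (drop_ne_doP (by omega)) (drop_ne_dontP (by omega))
  have hexp : (List.range 7).map ((s.length - 7) + ·) =
      [s.length - 7 + 0, s.length - 7 + 1, s.length - 7 + 2, s.length - 7 + 3,
       s.length - 7 + 4, s.length - 7 + 5, s.length - 7 + 6] := rfl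
  rw [hpre, hexp]
  simp only [List.filterMap_cons, List.filterMap_nil, hd 0, hd 1, hd 2, hd 3, hd 4, hd 5, hd 6,
    List.drop_zero, gB_dontP,
    gB_dontP_drop 1 (by omega) (by omega), gB_dontP_drop 2 (by omega) (by omega),
    gB_dontP_drop 3 (by omega) (by omega), gB_dontP_drop 4 (by omega) (by omega),
    gB_dontP_drop 5 (by omega) (by omega), gB_dontP_drop 6 (by omega) (by omega),
    gA_dontP, gA_dontP_drop 1 (by omega), gA_dontP_drop 2 (by omega),
    gA_dontP_drop 3 (by omega), gA_dontP_drop 4 (by omega), gA_dontP_drop 5 (by omega),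
    gA_dontP_drop 6 (by omega)]
  simp

lemma evA_head (r : List Char) (hr : r ≠ []) :
    evA (doP ++ r) = (0, doP) ::
      ((List.range (r.length + 3)).map Nat.succ).filterMap
        (fun i => gA ((doP ++ r).drop i) i) := by
  have hrlen : 1 ≤ r.length := List.length_pos_iff.mpr hr
  unfold evA
  rw [show (doP ++ r).length = (r.length + 3) + 1 from by simp [doP],
    List.range_succ_eq_map, List.filterMap_cons]
  have h0 : gA ((doP ++ r).drop 0) 0 = some (0, doP) := by
    rw [List.drop_zero]
    unfold gA pvStrictDo
    have hp : doP.isPrefixOf (doP ++ r) = true :=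
      List.isPrefixOf_iff_prefix.mpr (List.prefix_append _ _)
    have hgt : decide (4 < (doP ++ r).length) = true := by
      rw [decide_eq_true_iff]; simp [doP]; omega
    rw [if_pos (by rw [hp, hgt]; rfl)]
  rw [h0]

lemma kept_eq (input : String) (hpre : input ≠ "") (hD : ¬ D_get_enabled_code input) :
    pvKeepB (pvScanB (doP ++ input.toList)) =
      pvDedupA (PySem.List.sorted
        ((pvFind (doP ++ input.toList) doP).map (fun x => (x, doP)) ++
         (pvFind (doP ++ input.toList) dontP).map (fun x => (x, dontP))) (fun p => p.1) false) 0 := by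
  have hr : input.toList ≠ [] := fun h => hpre (String.toList_eq_nil_iff.mp h)
  have hA : pvDedupA (PySem.List.sorted
      ((pvFind (doP ++ input.toList) doP).map (fun x => (x, doP)) ++
       (pvFind (doP ++ input.toList) dontP).map (fun x => (x, dontP))) (fun p => p.1) false) 0 =
      (0, doP) :: drun doP (((List.range (input.toList.length + 3)).map Nat.succ).filterMap
        (fun i => gA ((doP ++ input.toList).drop i) i)) := by
    rw [sortedIdx_eq, evA_head input.toList hr, dedupA_eq]
  rw [hA]
  by_cases hdo : doP.isSuffixOf (doP ++ input.toList) = true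
  · have hld : pvLastDo (doP ++ input.toList) true = true := by
      cases hlast : pvLastDo (doP ++ input.toList) true
      · exact absurd ⟨hpre, Or.inl ⟨hdo, hlast⟩⟩ hD
      · rfl
    have h1 := (lastDo_eq_tags (doP ++ input.toList) true).symm.trans hld
    rw [tags_eq_map, evA_head input.toList hr, List.map_cons,
      List.getLastD_cons] at h1
    have hcond : ((((List.range (input.toList.length + 3)).map Nat.succ).filterMap
        (fun i => gA ((doP ++ input.toList).drop i) i)).getLast?.map (fun x => x.2)).getD doP
        = doP := by
      cases htl : (((List.range (input.toList.length + 3)).map Nat.succ).filterMap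
          (fun i => gA ((doP ++ input.toList).drop i) i)).getLast? with
      | none => rfl
      | some x =>
        rw [List.getLastD_eq_getLast?, List.getLast?_map, htl] at h1
        simp only [Option.map_some, Option.getD_some] at h1 ⊢
        exact beq_iff_eq.mp h1
    rw [E_do _ hdo, evA_head input.toList hr, List.cons_append, keepB_eq]
    exact congrArg (List.cons ((0 : Nat), doP)) (drun_absorb _ doP _ hcond.symm)
  · by_cases hdont : dontP.isSuffixOf (doP ++ input.toList) = true
    · have hld : pvLastDo (doP ++ input.toList) true = false := by
        cases hlast : pvLastDo (doP ++ input.toList) true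
        · rfl
        · exact absurd ⟨hpre, Or.inr ⟨hdont, hlast⟩⟩ hD
      have h1 := (lastDo_eq_tags (doP ++ input.toList) true).symm.trans hld
      rw [tags_eq_map, evA_head input.toList hr, List.map_cons,
        List.getLastD_cons] at h1
      have hcond : ((((List.range (input.toList.length + 3)).map Nat.succ).filterMap
          (fun i => gA ((doP ++ input.toList).drop i) i)).getLast?.map (fun x => x.2)).getD doP
          = dontP := by
        cases htl : (((List.range (input.toList.length + 3)).map Nat.succ).filterMap
            (fun i => gA ((doP ++ input.toList).drop i) i)).getLast? with
        | none =>
          rw [List.getLastD_eq_getLast?, List.getLast?_map, htl] at h1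
          simp only [Option.map_none, Option.getD_none] at h1
          exact absurd h1 (by decide)
        | some x =>
          rw [List.getLastD_eq_getLast?, List.getLast?_map, htl] at h1
          simp only [Option.map_some, Option.getD_some] at h1 ⊢
          have hx : x ∈ evA (doP ++ input.toList) := by
            rw [evA_head input.toList hr]
            exact List.mem_cons_of_mem _ (List.mem_of_getLast? htl)
          rcases evA_snd hx with h | h
          · rw [h] at h1
            exact absurd h1 (by decide)
          · exact h
      rw [E_dont _ hdont, evA_head input.toList hr, List.cons_append, keepB_eq]
      exact congrArg (List.cons ((0 : Nat), doP)) (drun_absorb _ doP _ hcond.symm)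
    · rw [E_none _ (eq_false_of_ne_true hdo) (eq_false_of_ne_true hdont),
        evA_head input.toList hr, keepB_eq]

-- ===== tightness: A ≠ B everywhere inside D_ =====

-- tag after folding a run of events (front recursion)
def lastT (τ : List Char) : List (Nat × List Char) → List Char
  | [] => τ
  | e :: t => lastT e.2 t

-- the pair-slicing of an event list, structurally
def pairsP (s : List Char) : List (Nat × List Char) → List Char
  | a :: b :: t => (s.drop a.1).take (b.1 - a.1) ++ pairsP s t
  | _ => []

def outSpec (s : List Char) (K : List (Nat × List Char)) : List Char :=
  pairsP s K ++ (match K.getLast? with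
    | some last => if last.2 == doP then s.drop last.1 else []
    | none => [])

lemma lastT_eq_getLast : ∀ (t : List (Nat × List Char)) (τ : List Char),
    lastT τ t = ((t.getLast?.map (fun x => x.2)).getD τ) := by
  intro t
  induction t with
  | nil => intro τ; rfl
  | cons e t' ih =>
    intro τ
    show lastT e.2 t' = _
    rw [ih e.2]
    cases t' with
    | nil => rfl
    | cons b t'' =>
      rw [List.getLast?_cons_cons]
      rcases h : (b :: t'').getLast? with _ | v
      · exact absurd (List.getLast?_eq_none_iff.mp h) (by simp)
      · simp

lemma getLast?_cons_eq : ∀ (l : List (Nat × List Char)) (a : Nat × List Char),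
    (a :: l).getLast? = some ((l.getLast?).getD a) := by
  intro l
  induction l with
  | nil => intro a; rfl
  | cons b t ih =>
    intro a
    rw [List.getLast?_cons_cons, ih b]
    rfl

lemma drun_subset : ∀ (t : List (Nat × List Char)) (τ : List Char), drun τ t ⊆ t := by
  intro t
  induction t with
  | nil => intro τ; exact fun x hx => hx
  | cons e t' ih =>
    intro τ
    by_cases h : e.2 = τ
    · rw [drun_cons_eq _ _ _ h]
      exact (ih τ).trans (List.subset_cons_self _ _)
    · rw [drun_cons_ne _ _ _ h]
      exact List.cons_subset_cons _ (ih e.2)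

lemma lastT_pair : ∀ (t : List (Nat × List Char)) (τ : List Char),
    (∀ e ∈ t, e.2 = doP ∨ e.2 = dontP) → (τ = doP ∨ τ = dontP) →
    (lastT τ t = doP ∨ lastT τ t = dontP) := by
  intro t
  induction t with
  | nil => intro τ _ hτ; exact hτ
  | cons e t' ih =>
    intro τ htags hτ
    exact ih e.2 (fun x hx => htags x (List.mem_cons_of_mem _ hx))
      (htags e (List.mem_cons_self))

lemma drun_last : ∀ (t : List (Nat × List Char)) (τ : List Char),
    lastT τ (drun τ t) = lastT τ t := by
  intro t
  induction t with
  | nil => intro τ; rfl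
  | cons e t' ih =>
    intro τ
    by_cases h : e.2 = τ
    · rw [drun_cons_eq _ _ _ h]
      show lastT τ (drun τ t') = lastT e.2 t'
      rw [ih τ, h]
    · rw [drun_cons_ne _ _ _ h]
      show lastT e.2 (drun e.2 t') = lastT e.2 t'
      exact ih e.2

lemma drun_parity : ∀ (t : List (Nat × List Char)) (τ : List Char),
    (∀ e ∈ t, e.2 = doP ∨ e.2 = dontP) → (τ = doP ∨ τ = dontP) →
    ((drun τ t).length % 2 = 0 ↔ lastT τ t = τ) := by
  intro t
  induction t with
  | nil => intro τ _ _; simp [drun, lastT]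
  | cons e t' ih =>
    intro τ htags hτ
    have htags' : ∀ x ∈ t', x.2 = doP ∨ x.2 = dontP :=
      fun x hx => htags x (List.mem_cons_of_mem _ hx)
    have he : e.2 = doP ∨ e.2 = dontP := htags e (List.mem_cons_self)
    by_cases h : e.2 = τ
    · rw [drun_cons_eq _ _ _ h]
      show _ ↔ lastT e.2 t' = τ
      rw [h]
      exact ih τ htags' hτ
    · rw [drun_cons_ne _ _ _ h]
      show (e :: drun e.2 t').length % 2 = 0 ↔ lastT e.2 t' = τ
      have hih := ih e.2 htags' he
      have hlp := lastT_pair t' e.2 htags' he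
      have hdodont : doP ≠ dontP := by decide
      constructor
      · intro hl
        have : ¬ ((drun e.2 t').length % 2 = 0) := by
          simp only [List.length_cons] at hl
          omega
        have hne : lastT e.2 t' ≠ e.2 := fun hc => this (hih.mpr hc)
        rcases hlp with h1 | h1 <;> rcases he with h2 | h2 <;> rcases hτ with h3 | h3 <;>
          simp_all
      · intro hl
        have hne : lastT e.2 t' ≠ e.2 := by rw [hl]; exact fun hc => h hc.symm
        have : ¬ ((drun e.2 t').length % 2 = 0) := fun hc => hne (hih.mp hc)
        simp only [List.length_cons]
        omega

lemma drun_append_ne : ∀ (t : List (Nat × List Char)) (τ : List Char) (e : Nat × List Char),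
    e.2 ≠ lastT τ t → drun τ (t ++ [e]) = drun τ t ++ [e] := by
  intro t
  induction t with
  | nil =>
    intro τ e h
    rw [List.nil_append, drun_cons_ne _ _ _ (show e.2 ≠ τ from h)]
    rfl
  | cons x t' ih =>
    intro τ e h
    have h' : e.2 ≠ lastT x.2 t' := h
    by_cases hx : x.2 = τ
    · rw [List.cons_append, drun_cons_eq _ _ _ hx, drun_cons_eq _ _ _ hx,
        ih τ e (by rw [← hx]; exact h')]
    · rw [List.cons_append, drun_cons_ne _ _ _ hx, drun_cons_ne _ _ _ hx,
        List.cons_append, ih x.2 e h']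

lemma sliceA_pairs (s : List Char) : ∀ (f : Nat) (l : List (Nat × List Char)) (i : Nat),
    l.length ≤ f + i → pvSliceAF s l f i = pairsP s (l.drop i) := by
  intro f
  induction f with
  | zero =>
    intro l i h
    rw [List.drop_eq_nil_of_le (by omega)]
    rfl
  | succ f ih =>
    intro l i h
    unfold pvSliceAF
    by_cases hg : i + 1 < l.length
    · rw [if_pos hg, ih l (i + 2) (by omega)]
      rw [List.drop_eq_getElem_cons (show i < l.length by omega),
        List.drop_eq_getElem_cons hg]
      show _ = (s.drop l[i].1).take (l[i + 1].1 - l[i].1) ++ pairsP s (l.drop (i + 1 + 1))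
      rw [List.getD_eq_getElem l _ (show i < l.length by omega),
        List.getD_eq_getElem l _ hg]
    · rw [if_neg hg]
      have hlen : (l.drop i).length ≤ 1 := by rw [List.length_drop]; omega
      rcases hd : l.drop i with _ | ⟨x, _ | ⟨y, t2⟩⟩
      · rfl
      · rfl
      · rw [hd] at hlen; simp at hlen

lemma pairsP_append_even (s : List Char) : ∀ (K : List (Nat × List Char)),
    K.length % 2 = 0 → ∀ (e : Nat × List Char), pairsP s (K ++ [e]) = pairsP s K
  | [], _, _ => rfl
  | [x], h, _ => by simp at h
  | a :: b :: t, h, e => by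
    show (s.drop a.1).take (b.1 - a.1) ++ pairsP s (t ++ [e]) =
      (s.drop a.1).take (b.1 - a.1) ++ pairsP s t
    rw [pairsP_append_even s t (by simp at h ⊢; omega) e]

lemma pairsP_append_odd (s : List Char) : ∀ (K : List (Nat × List Char))
    (x e : Nat × List Char), K.length % 2 = 1 → K.getLast? = some x →
    pairsP s (K ++ [e]) = pairsP s K ++ (s.drop x.1).take (e.1 - x.1)
  | [], x, e, h, _ => by simp at h
  | [y], x, e, _, hl => by
    have hx : y = x := by simpa using hl
    subst hx
    show (s.drop y.1).take (e.1 - y.1) ++ pairsP s [] = pairsP s [y] ++ (s.drop y.1).take (e.1 - y.1)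
    simp [pairsP]
  | a :: b :: t, x, e, h, hl => by
    have ht : t.length % 2 = 1 := by simp at h ⊢; omega
    have htne : t ≠ [] := by intro hc; rw [hc] at ht; simp at ht
    have hlt : t.getLast? = some x := by
      rw [List.getLast?_cons_cons] at hl
      rcases t with _ | ⟨c, t'⟩
      · exact absurd rfl htne
      · rw [List.getLast?_cons_cons] at hl; exact hl
    show (s.drop a.1).take (b.1 - a.1) ++ pairsP s (t ++ [e]) =
      ((s.drop a.1).take (b.1 - a.1) ++ pairsP s t) ++ _
    rw [pairsP_append_odd s t x e ht hlt, List.append_assoc]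

lemma evA_dont_bound {s : List Char} (hdont : dontP.isSuffixOf s = true) :
    ∀ x ∈ evA s, x.1 < s.length - 7 := by
  intro x hx
  have hlen : 7 ≤ s.length := (List.isSuffixOf_iff_suffix.mp hdont).length_le
  have hdrop : s.drop (s.length - 7) = dontP := suffix_drop hdont
  have hd : ∀ j, s.drop (s.length - 7 + j) = dontP.drop j := by
    intro j; rw [← List.drop_drop, hdrop]
  unfold evA at hx
  obtain ⟨i, hi, hg⟩ := List.mem_filterMap.mp hx
  have hilt : i < s.length := List.mem_range.mp hi
  have hfst : x.1 = i := gA_fst hg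
  by_contra hge
  have hge' : s.length - 7 ≤ i := by omega
  have hj : i - (s.length - 7) ≤ 6 := by omega
  rw [show i = s.length - 7 + (i - (s.length - 7)) from by omega, hd] at hg
  interval_cases h : i - (s.length - 7)
  · rw [List.drop_zero, gA_dontP] at hg; cases hg
  · rw [gA_dontP_drop 1 (by omega)] at hg; cases hg
  · rw [gA_dontP_drop 2 (by omega)] at hg; cases hg
  · rw [gA_dontP_drop 3 (by omega)] at hg; cases hg
  · rw [gA_dontP_drop 4 (by omega)] at hg; cases hg
  · rw [gA_dontP_drop 5 (by omega)] at hg; cases hg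
  · rw [gA_dontP_drop 6 (by omega)] at hg; cases hg

lemma portA_out (input : String) :
    get_enabled_code input = String.ofList (outSpec (doP ++ input.toList)
      (pvDedupA (PySem.List.sorted
        ((pvFind (doP ++ input.toList) doP).map (fun x => (x, doP)) ++
         (pvFind (doP ++ input.toList) dontP).map (fun x => (x, dontP)))
        (fun p => p.1) false) 0)) := by
  simp only [get_enabled_code]
  unfold outSpec
  congr 1
  unfold pvSliceA
  rw [sliceA_pairs _ _ _ 0 (by omega), List.drop_zero]

lemma portB_out (input : String) :
    get_enabled_code_alt input = String.ofList (outSpec (doP ++ input.toList)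
      (pvKeepB (pvScanB (doP ++ input.toList)))) := by
  simp only [get_enabled_code_alt]
  unfold outSpec
  congr 1
  rw [List.flatten_append]
  congr 1
  · unfold pvSliceB
    rw [← sliceF_eq, sliceA_pairs _ _ _ 0 (by omega), List.drop_zero]
  · cases hl : (pvKeepB (pvScanB (doP ++ input.toList))).getLast? with
    | none => rfl
    | some last =>
      by_cases ht : last.2 == doP
      · simp [ht]
      · simp [ht]

def tAx (input : String) : List (Nat × List Char) :=
  ((List.range (input.toList.length + 3)).map Nat.succ).filterMap
    (fun i => gA ((doP ++ input.toList).drop i) i)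

lemma evA_head' (input : String) (hr : input.toList ≠ []) :
    evA (doP ++ input.toList) = (0, doP) :: tAx input := evA_head input.toList hr

lemma tAx_sub (input : String) (hr : input.toList ≠ []) :
    ∀ e ∈ tAx input, e ∈ evA (doP ++ input.toList) := by
  intro e he
  rw [evA_head' input hr]
  exact List.mem_cons_of_mem _ he

lemma tAx_tags (input : String) (hr : input.toList ≠ []) :
    ∀ e ∈ tAx input, e.2 = doP ∨ e.2 = dontP :=
  fun e he => evA_snd (tAx_sub input hr e he)

lemma lastT_pvLastDo (input : String) (hr : input.toList ≠ []) :
    pvLastDo (doP ++ input.toList) true = (lastT doP (tAx input) == doP) := by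
  rw [lastT_eq_getLast, lastDo_eq_tags, tags_eq_map, evA_head' input hr, List.map_cons,
    List.getLastD_cons, List.getLastD_eq_getLast?, List.getLast?_map]
  cases htl : (tAx input).getLast? with
  | none => simp
  | some x => simp

lemma outSpec_eval (s : List Char) (K : List (Nat × List Char)) (y : Nat × List Char)
    (h : K.getLast? = some y) :
    outSpec s K = pairsP s K ++ (if y.2 == doP then s.drop y.1 else []) := by
  unfold outSpec
  rw [h]

lemma keptA_eq' (input : String) (hr : input.toList ≠ []) :
    pvDedupA (PySem.List.sorted
      ((pvFind (doP ++ input.toList) doP).map (fun x => (x, doP)) ++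
       (pvFind (doP ++ input.toList) dontP).map (fun x => (x, dontP)))
      (fun p => p.1) false) 0 = (0, doP) :: drun doP (tAx input) := by
  rw [sortedIdx_eq, evA_head' input hr, dedupA_eq]

theorem get_enabled_code_spec : Claim_unchanged_get_enabled_code := by
  intro input hdom hpre hD
  show get_enabled_code input = get_enabled_code_alt input
  simp only [get_enabled_code, get_enabled_code_alt]
  rw [kept_eq input hpre hD]
  generalize pvDedupA (PySem.List.sorted
      ((pvFind (doP ++ input.toList) doP).map (fun x => (x, doP)) ++
       (pvFind (doP ++ input.toList) dontP).map (fun x => (x, dontP))) (fun p => p.1) false) 0 = K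
  congr 1
  rw [List.flatten_append]
  congr 1
  · unfold pvSliceA pvSliceB
    exact sliceF_eq _ _ _ _
  · cases hl : K.getLast? with
    | none => rfl
    | some last =>
      by_cases ht : last.2 == doP
      · simp [ht]
      · simp [ht]

theorem get_enabled_code_changed : Claim_changed_get_enabled_code := by
  unfold Claim_changed_get_enabled_code; decide



theorem get_enabled_code_tight : Claim_exact_get_enabled_code := by
  intro input hdom hpre hD hEq
  obtain ⟨hne, hcase⟩ := hD
  have hr : input.toList ≠ [] := fun h => hpre (String.toList_eq_nil_iff.mp h)
  rw [portA_out, portB_out] at hEq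
  have hlist := congrArg String.toList hEq
  simp only [String.toList_ofList] at hlist
  rw [keptA_eq' input hr] at hlist
  have htags := tAx_tags input hr
  have hpar0 := drun_parity (tAx input) doP htags (Or.inl rfl)
  rcases hcase with ⟨hdo, hlast⟩ | ⟨hdont, hlast⟩
  · -- text ends with do() while the state is off
    have hτ : lastT doP (tAx input) = dontP := by
      have h1 := lastT_pvLastDo input hr
      rw [hlast] at h1
      have hne' : lastT doP (tAx input) ≠ doP := by
        intro hc
        rw [hc] at h1
        exact absurd h1.symm (by decide)
      rcases lastT_pair _ _ htags (Or.inl rfl) with h | h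
      · exact absurd h hne'
      · exact h
    have hKB : pvKeepB (pvScanB (doP ++ input.toList)) =
        ((0, doP) :: drun doP (tAx input)) ++ [((doP ++ input.toList).length - 4, doP)] := by
      rw [E_do _ hdo, evA_head' input hr, List.cons_append, keepB_eq]
      show (0, doP) :: drun doP (tAx input ++ [((doP ++ input.toList).length - 4, doP)]) = _
      rw [drun_append_ne _ _ _ (fun hc => (show doP = dontP → False by decide) (hτ ▸ hc))]
      rfl
    rw [hKB] at hlist
    have hparD : (drun doP (tAx input)).length % 2 = 1 := by
      have hne' : lastT doP (tAx input) ≠ doP := by rw [hτ]; decide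
      have h2 : ¬ ((drun doP (tAx input)).length % 2 = 0) := fun hc => hne' (hpar0.mp hc)
      omega
    have hyE : ((drun doP (tAx input)).getLast?.getD (0, doP)).2 = dontP := by
      have hl := drun_last (tAx input) doP
      rw [hτ, lastT_eq_getLast] at hl
      cases hDl : (drun doP (tAx input)).getLast? with
      | none => rw [hDl] at hl; exact absurd hl (by decide)
      | some u => rw [hDl] at hl; simpa using hl
    rw [outSpec_eval _ _ _ (getLast?_cons_eq _ _), hyE,
      outSpec_eval _ _ _ List.getLast?_concat] at hlist
    have hdrop : (doP ++ input.toList).drop ((doP ++ input.toList).length - 4) = doP :=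
      suffix_drop hdo
    rw [show ((dontP == doP) = false) from by decide, if_neg (by simp),
      if_pos (show (doP == doP) = true from by decide), hdrop] at hlist
    rw [show ((0, doP) :: drun doP (tAx input)) ++ [((doP ++ input.toList).length - 4, doP)]
        = ((0, doP) :: drun doP (tAx input)) ++ [((doP ++ input.toList).length - 4, doP)] from rfl,
      pairsP_append_even _ _ (by simp only [List.length_cons]; omega) _] at hlist
    exact absurd (List.append_cancel_left hlist) (by decide)
  · -- text ends with don't() while the state is on
    have hτ : lastT doP (tAx input) = doP := by
      have h1 := lastT_pvLastDo input hr
      rw [hlast] at h1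
      exact beq_iff_eq.mp h1.symm
    have hKB : pvKeepB (pvScanB (doP ++ input.toList)) =
        ((0, doP) :: drun doP (tAx input)) ++ [((doP ++ input.toList).length - 7, dontP)] := by
      rw [E_dont _ hdont, evA_head' input hr, List.cons_append, keepB_eq]
      show (0, doP) :: drun doP (tAx input ++ [((doP ++ input.toList).length - 7, dontP)]) = _
      rw [drun_append_ne _ _ _ (fun hc => (show dontP = doP → False by decide) (hτ ▸ hc))]
      rfl
    rw [hKB] at hlist
    have hparD : (drun doP (tAx input)).length % 2 = 0 := hpar0.mpr hτ
    have hyE : ((drun doP (tAx input)).getLast?.getD (0, doP)).2 = doP := by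
      have hl := drun_last (tAx input) doP
      rw [hτ, lastT_eq_getLast] at hl
      cases hDl : (drun doP (tAx input)).getLast? with
      | none => rfl
      | some u => rw [hDl] at hl; simpa using hl
    have hyMem : ((drun doP (tAx input)).getLast?.getD (0, doP)) ∈ evA (doP ++ input.toList) := by
      cases hDl : (drun doP (tAx input)).getLast? with
      | none =>
        rw [evA_head' input hr]
        exact List.mem_cons_self
      | some u =>
        exact tAx_sub input hr u (drun_subset (tAx input) doP (List.mem_of_getLast? hDl))
    have hybound := evA_dont_bound hdont _ hyMem
    have hlen7 : 7 ≤ (doP ++ input.toList).length :=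
      (List.isSuffixOf_iff_suffix.mp hdont).length_le
    rw [outSpec_eval _ _ _ (getLast?_cons_eq _ _), hyE,
      outSpec_eval _ _ _ List.getLast?_concat] at hlist
    rw [if_pos (show (doP == doP) = true from by decide),
      show ((dontP == doP) = false) from by decide, if_neg (by simp),
      pairsP_append_odd _ _ _ _ (by simp only [List.length_cons]; omega)
        (getLast?_cons_eq _ _), List.append_nil] at hlist
    have hcan := List.append_cancel_left hlist
    have hlencan := congrArg List.length hcan
    rw [List.length_drop, List.length_take, List.length_drop] at hlencan
    have hfst : ((doP ++ input.toList).length - 7, dontP).1 = (doP ++ input.toList).length - 7 :=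
      rfl
    rw [hfst] at hlencan
    omega
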